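-- pv_equiv track=rewrite | github.com/Noightmore/DrawBox | DrawBoxProgram/drawableBox.py | drawEndLine
-- ===== SOURCE A (Python) =====
-- def drawEndLine(lenght):
--     line = ""
--     for i in range(0,lenght):
--         if i == 0 or i == lenght-1 :
--             line += "."
--         else:
--             line += "-"
--     return line
-- ===== SOURCE B (Python) =====
-- def drawEndLine(lenght):
--     if lenght <= 0:
--         return ""
--     if lenght == 1:
--         return "."
--     return "." + "-" * (lenght - 2) + "."
-- ===== Notes on version B (the rewrite author's own statement) =====
-- stated objective: simpler
-- what changed: Replaced the per-index loop with an endpoint-conditional per character by a closed-form string built from repetition: a dot, lenght-2 dashes, a dot (with guards for lenght <= 0 and lenght == 1).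
import Mathlib
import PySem

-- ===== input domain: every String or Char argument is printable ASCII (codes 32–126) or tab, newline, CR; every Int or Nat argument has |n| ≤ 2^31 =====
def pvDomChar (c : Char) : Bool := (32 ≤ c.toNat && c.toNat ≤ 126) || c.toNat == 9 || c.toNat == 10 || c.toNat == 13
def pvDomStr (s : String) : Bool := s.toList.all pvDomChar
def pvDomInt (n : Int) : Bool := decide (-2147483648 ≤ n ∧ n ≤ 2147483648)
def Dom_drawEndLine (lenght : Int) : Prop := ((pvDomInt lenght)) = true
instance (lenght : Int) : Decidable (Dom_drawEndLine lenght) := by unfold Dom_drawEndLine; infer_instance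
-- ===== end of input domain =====

-- B replaces A's per-index loop by a closed-form string (dot, lenght-2 dashes, dot); objective: simpler.

-- ===== PORT A =====
def drawEndLine (lenght : Int) : String :=
  (PySem.List.pyRange 0 lenght 1).foldl
    (fun line i => line ++ (if i = 0 ∨ i = lenght - 1 then "." else "-")) ""

-- ===== PORT B =====
def drawEndLine_alt (lenght : Int) : String :=
  if lenght ≤ 0 then ""
  else if lenght = 1 then "."
  else "." ++ String.ofList (List.replicate (lenght - 2).toNat '-') ++ "."

-- ===== PRECONDITION & SPEC =====
def Spec_drawEndLine (lenght : Int) (out : String) : Prop := out = drawEndLine_alt lenght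
instance (lenght : Int) (out : String) : Decidable (Spec_drawEndLine lenght out) := by unfold Spec_drawEndLine; infer_instance

-- ===== CLAIM (what is proved, stated in full; the proofs are below) =====
def Claim_equal_drawEndLine : Prop := ∀ (lenght : Int), Dom_drawEndLine lenght → Spec_drawEndLine lenght (drawEndLine lenght)

-- ===== LEMMAS AND PROOFS =====

-- middle of the loop: every index strictly between 0 and lenght-1 appends "-"
theorem drawEndLine_mid (L : Int) (k : Nat) :
    ∀ (a : Int) (acc : String), 0 < a → a + k ≤ L - 1 →
    (PySem.List.pyRange a (a + (k : Int)) 1).foldl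
      (fun line i => line ++ (if i = 0 ∨ i = L - 1 then "." else "-")) acc
      = acc ++ String.ofList (List.replicate k '-') := by
  induction k with
  | zero =>
    intro a acc _ _
    rw [PySem.List.pyRange_one_eq_nil (by omega : a + ((0:Nat) : Int) ≤ a)]
    apply String.ext; simp
  | succ k ih =>
    intro a acc h0 hk
    rw [PySem.List.pyRange_one_cons (by omega : a < a + ((k+1 : Nat) : Int))]
    have hne : ¬ (a = 0 ∨ a = L - 1) := by push_cast at hk; omega
    simp only [List.foldl_cons, if_neg hne]
    have : a + 1 + (k : Int) = a + ((k+1 : Nat) : Int) := by push_cast; ring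
    rw [← this]
    rw [ih (a+1) (acc ++ "-") (by omega) (by push_cast at hk ⊢; omega)]
    have : (acc ++ "-") ++ String.ofList (List.replicate k '-')
         = acc ++ String.ofList (List.replicate (k+1) '-') := by
      apply String.ext
      simp [List.replicate_succ]
    rw [this]

-- ===== VERDICT (by name: the statement is the Claim_ definition above) =====
theorem drawEndLine_spec : Claim_equal_drawEndLine := by
  intro L _
  unfold Spec_drawEndLine drawEndLine drawEndLine_alt
  by_cases h0 : L ≤ 0
  · rw [PySem.List.pyRange_one_eq_nil h0]
    simp [h0]
  · by_cases h1 : L = 1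
    · subst h1; decide
    · have hL : 2 ≤ L := by omega
      rw [PySem.List.pyRange_one_append 0 1 L (by omega) (by omega),
          List.foldl_append]
      have hsing : PySem.List.pyRange 0 1 1 = [0] := PySem.List.pyRange_one_singleton 0
      rw [hsing]
      have hsplit : PySem.List.pyRange 1 L 1
          = PySem.List.pyRange 1 (L-1) 1 ++ [L-1] := by
        have := PySem.List.pyRange_one_succ_right (show (1:Int) ≤ L-1 by omega)
        simpa [show L - 1 + 1 = L by ring] using this
      rw [hsplit, List.foldl_append]
      have hmidrange : PySem.List.pyRange 1 (L-1) 1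
          = PySem.List.pyRange 1 (1 + ((L-2).toNat : Int)) 1 := by
        congr 1; omega
      rw [hmidrange,
          drawEndLine_mid L (L-2).toNat 1 _ (by omega) (by omega)]
      simp only [List.foldl_cons, List.foldl_nil]
      simp only [true_or, or_true, if_true, if_neg h0, if_neg h1]
      apply String.ext
      simp
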